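-- pv_equiv track=rewrite | github.com/arrogantrabbit/ai-storj-node-web-monitor | websies.py | get_size_bucket
-- ===== SOURCE A (Python) =====
-- SIZE_BUCKET_THRESHOLDS = [
--     (1024, "< 1 KB"),
--     (4096, "1-4 KB"),
--     (16384, "4-16 KB"),
--     (65536, "16-64 KB"),
--     (262144, "64-256 KB"),
--     (1048576, "256 KB - 1 MB")
-- ]
--
-- _size_bucket_cache = {}
--
-- _CACHE_MAX_SIZE = 10000
--
-- def get_size_bucket(size_in_bytes):
--     """Get size bucket with caching for frequently seen sizes."""
--     # Check cache first
--     if size_in_bytes in _size_bucket_cache: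
--         return _size_bucket_cache[size_in_bytes]
--
--     # Calculate bucket
--     for threshold, label in SIZE_BUCKET_THRESHOLDS:
--         if size_in_bytes < threshold:
--             bucket = label
--             break
--     else:
--         bucket = "> 1 MB"
--
--     # Cache result (with simple size limit)
--     if len(_size_bucket_cache) < _CACHE_MAX_SIZE:
--         _size_bucket_cache[size_in_bytes] = bucket
--
--     return bucket
-- ===== SOURCE B (Python) =====
-- import bisect
--
-- SIZE_BUCKET_THRESHOLDS = [
--     (1024, "< 1 KB"),
--     (4096, "1-4 KB"),
--     (16384, "4-16 KB"),
--     (65536, "16-64 KB"),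
--     (262144, "64-256 KB"),
--     (1048576, "256 KB - 1 MB")
-- ]
--
-- _size_bucket_cache = {}
--
-- _CACHE_MAX_SIZE = 10000
--
-- _THRESHOLDS = [t for t, _ in SIZE_BUCKET_THRESHOLDS]
-- _LABELS = [l for _, l in SIZE_BUCKET_THRESHOLDS] + ["> 1 MB"]
--
-- def get_size_bucket(size_in_bytes):
--     """Get size bucket with caching for frequently seen sizes."""
--     if size_in_bytes in _size_bucket_cache:
--         return _size_bucket_cache[size_in_bytes]
--     bucket = _LABELS[bisect.bisect_right(_THRESHOLDS, size_in_bytes)]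
--     if len(_size_bucket_cache) < _CACHE_MAX_SIZE:
--         _size_bucket_cache[size_in_bytes] = bucket
--     return bucket
-- ===== Notes on version B (the rewrite author's own statement) =====
-- stated objective: idiomatic
-- what changed: Replaces the for/else linear scan over the threshold pairs with a binary search (bisect_right) over a precomputed sorted thresholds list indexing into a labels list (with '> 1 MB' appended); the cache logic is unchanged.
import Mathlib
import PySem

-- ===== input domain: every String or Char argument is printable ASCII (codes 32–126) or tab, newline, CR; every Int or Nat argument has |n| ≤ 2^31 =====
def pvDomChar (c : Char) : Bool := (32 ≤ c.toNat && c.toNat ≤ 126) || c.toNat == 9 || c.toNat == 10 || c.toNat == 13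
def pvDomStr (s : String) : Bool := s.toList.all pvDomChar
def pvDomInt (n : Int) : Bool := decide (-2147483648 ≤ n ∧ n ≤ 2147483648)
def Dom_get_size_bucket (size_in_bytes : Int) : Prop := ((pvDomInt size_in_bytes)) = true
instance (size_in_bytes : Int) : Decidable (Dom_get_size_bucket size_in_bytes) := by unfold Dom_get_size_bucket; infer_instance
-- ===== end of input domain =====

-- B replaces A's for/else linear scan with a bisect_right binary search over a
-- precomputed thresholds list; equivalence is about the RETURN value (both
-- Pythons also fill a module-level memoization cache, which never changes the
-- value returned).

-- ===== PORT A =====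
def SIZE_BUCKET_THRESHOLDS : List (Int × String) :=
  [(1024, "< 1 KB"), (4096, "1-4 KB"), (16384, "4-16 KB"),
   (65536, "16-64 KB"), (262144, "64-256 KB"), (1048576, "256 KB - 1 MB")]

-- A's for/else loop: first label whose threshold exceeds the size, else "> 1 MB"
def pvScanA (size_in_bytes : Int) : List (Int × String) → String
  | [] => "> 1 MB"
  | (threshold, label) :: rest =>
      if size_in_bytes < threshold then label else pvScanA size_in_bytes rest

def get_size_bucket (size_in_bytes : Int) : String :=
  pvScanA size_in_bytes SIZE_BUCKET_THRESHOLDS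

-- ===== PORT B =====
def pvTHRESHOLDS : List Int := SIZE_BUCKET_THRESHOLDS.map Prod.fst
def pvLABELS : List String := SIZE_BUCKET_THRESHOLDS.map Prod.snd ++ ["> 1 MB"]

-- bisect.bisect_right(a, x): Python's `while lo < hi` loop, step for step
-- (structural recursion on the loop variant hi - lo, which strictly decreases)
def pvBisectLoop (a : List Int) (x : Int) : Nat → Nat → Nat → Nat
  | 0, lo, _ => lo
  | fuel + 1, lo, hi =>
    if lo < hi then
      let mid := (lo + hi) / 2
      if x < a.getD mid 0 then pvBisectLoop a x fuel lo mid
      else pvBisectLoop a x fuel (mid + 1) hi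
    else lo

def pvBisectRight (a : List Int) (x : Int) (lo hi : Nat) : Nat :=
  pvBisectLoop a x (hi - lo) lo hi

def get_size_bucket_alt (size_in_bytes : Int) : String :=
  pvLABELS.getD (pvBisectRight pvTHRESHOLDS size_in_bytes 0 pvTHRESHOLDS.length) ""

-- ===== PRECONDITION & SPEC =====
def Spec_get_size_bucket (size_in_bytes : Int) (out : String) : Prop := out = get_size_bucket_alt size_in_bytes
instance (size_in_bytes : Int) (out : String) : Decidable (Spec_get_size_bucket size_in_bytes out) := by unfold Spec_get_size_bucket; infer_instance

-- ===== CLAIM (what is proved, stated in full; the proofs are below) =====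
def Claim_equal_get_size_bucket : Prop := ∀ (size_in_bytes : Int), Dom_get_size_bucket size_in_bytes → Spec_get_size_bucket size_in_bytes (get_size_bucket size_in_bytes)

-- ===== LEMMAS AND PROOFS =====

-- enough fuel makes the fuel parameter irrelevant
theorem pv_loop_fuel (a : List Int) (x : Int) :
    ∀ (f g lo hi : Nat), hi - lo ≤ f → hi - lo ≤ g →
      pvBisectLoop a x f lo hi = pvBisectLoop a x g lo hi := by
  intro f
  induction f with
  | zero =>
    intro g lo hi hf _
    cases g with
    | zero => rfl
    | succ g => simp only [pvBisectLoop]; rw [if_neg (by omega)]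
  | succ f ih =>
    intro g lo hi hf hg
    cases g with
    | zero => simp only [pvBisectLoop]; rw [if_neg (by omega)]
    | succ g =>
      simp only [pvBisectLoop]
      by_cases h : lo < hi
      · rw [if_pos h, if_pos h]
        split_ifs
        · exact ih g lo ((lo + hi) / 2) (by omega) (by omega)
        · exact ih g ((lo + hi) / 2 + 1) hi (by omega) (by omega)
      · rw [if_neg h, if_neg h]

theorem pv_step (a : List Int) (x : Int) (lo hi : Nat) (h : lo < hi) :
    pvBisectRight a x lo hi =
      if x < a.getD ((lo + hi) / 2) 0 then pvBisectRight a x lo ((lo + hi) / 2)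
      else pvBisectRight a x ((lo + hi) / 2 + 1) hi := by
  unfold pvBisectRight
  rw [pv_loop_fuel a x (hi - lo) (hi - lo + 1) lo hi (by omega) (by omega)]
  simp only [pvBisectLoop]
  rw [if_pos h]
  split_ifs with hx
  · exact pv_loop_fuel a x (hi - lo) ((lo + hi) / 2 - lo) lo ((lo + hi) / 2) (by omega) (by omega)
  · exact pv_loop_fuel a x (hi - lo) (hi - ((lo + hi) / 2 + 1)) ((lo + hi) / 2 + 1) hi (by omega) (by omega)

theorem pv_base (a : List Int) (x : Int) (lo hi : Nat) (h : ¬ lo < hi) :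
    pvBisectRight a x lo hi = lo := by
  unfold pvBisectRight
  have : hi - lo = 0 := by omega
  rw [this]
  rfl

theorem pv_bis0 (x : Int) (h : x < 1024) :
    pvBisectRight pvTHRESHOLDS x 0 pvTHRESHOLDS.length = 0 := by
  show pvBisectRight [1024, 4096, 16384, 65536, 262144, 1048576] x 0 6 = 0
  rw [pv_step _ _ _ _ (by omega)]; norm_num [List.getD]
  rw [if_pos (by omega : x < 65536)]
  rw [pv_step _ _ _ _ (by omega)]; norm_num [List.getD]
  rw [if_pos (by omega : x < 4096)]
  rw [pv_step _ _ _ _ (by omega)]; norm_num [List.getD]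
  rw [if_pos (by omega : x < 1024)]
  rw [pv_base _ _ _ _ (by omega)]

theorem pv_bis1 (x : Int) (h : 1024 ≤ x) (h' : x < 4096) :
    pvBisectRight pvTHRESHOLDS x 0 pvTHRESHOLDS.length = 1 := by
  show pvBisectRight [1024, 4096, 16384, 65536, 262144, 1048576] x 0 6 = 1
  rw [pv_step _ _ _ _ (by omega)]; norm_num [List.getD]
  rw [if_pos (by omega : x < 65536)]
  rw [pv_step _ _ _ _ (by omega)]; norm_num [List.getD]
  rw [if_pos (by omega : x < 4096)]
  rw [pv_step _ _ _ _ (by omega)]; norm_num [List.getD]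
  rw [if_neg (by omega : ¬ x < 1024)]
  rw [pv_base _ _ _ _ (by omega)]

theorem pv_bis2 (x : Int) (h : 4096 ≤ x) (h' : x < 16384) :
    pvBisectRight pvTHRESHOLDS x 0 pvTHRESHOLDS.length = 2 := by
  show pvBisectRight [1024, 4096, 16384, 65536, 262144, 1048576] x 0 6 = 2
  rw [pv_step _ _ _ _ (by omega)]; norm_num [List.getD]
  rw [if_pos (by omega : x < 65536)]
  rw [pv_step _ _ _ _ (by omega)]; norm_num [List.getD]
  rw [if_neg (by omega : ¬ x < 4096)]
  rw [pv_step _ _ _ _ (by omega)]; norm_num [List.getD]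
  rw [if_pos (by omega : x < 16384)]
  rw [pv_base _ _ _ _ (by omega)]

theorem pv_bis3 (x : Int) (h : 16384 ≤ x) (h' : x < 65536) :
    pvBisectRight pvTHRESHOLDS x 0 pvTHRESHOLDS.length = 3 := by
  show pvBisectRight [1024, 4096, 16384, 65536, 262144, 1048576] x 0 6 = 3
  rw [pv_step _ _ _ _ (by omega)]; norm_num [List.getD]
  rw [if_pos (by omega : x < 65536)]
  rw [pv_step _ _ _ _ (by omega)]; norm_num [List.getD]
  rw [if_neg (by omega : ¬ x < 4096)]
  rw [pv_step _ _ _ _ (by omega)]; norm_num [List.getD]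
  rw [if_neg (by omega : ¬ x < 16384)]
  rw [pv_base _ _ _ _ (by omega)]

theorem pv_bis4 (x : Int) (h : 65536 ≤ x) (h' : x < 262144) :
    pvBisectRight pvTHRESHOLDS x 0 pvTHRESHOLDS.length = 4 := by
  show pvBisectRight [1024, 4096, 16384, 65536, 262144, 1048576] x 0 6 = 4
  rw [pv_step _ _ _ _ (by omega)]; norm_num [List.getD]
  rw [if_neg (by omega : ¬ x < 65536)]
  rw [pv_step _ _ _ _ (by omega)]; norm_num [List.getD]
  rw [if_pos (by omega : x < 1048576)]
  rw [pv_step _ _ _ _ (by omega)]; norm_num [List.getD]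
  rw [if_pos (by omega : x < 262144)]
  rw [pv_base _ _ _ _ (by omega)]

theorem pv_bis5 (x : Int) (h : 262144 ≤ x) (h' : x < 1048576) :
    pvBisectRight pvTHRESHOLDS x 0 pvTHRESHOLDS.length = 5 := by
  show pvBisectRight [1024, 4096, 16384, 65536, 262144, 1048576] x 0 6 = 5
  rw [pv_step _ _ _ _ (by omega)]; norm_num [List.getD]
  rw [if_neg (by omega : ¬ x < 65536)]
  rw [pv_step _ _ _ _ (by omega)]; norm_num [List.getD]
  rw [if_pos (by omega : x < 1048576)]
  rw [pv_step _ _ _ _ (by omega)]; norm_num [List.getD]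
  rw [if_neg (by omega : ¬ x < 262144)]
  rw [pv_base _ _ _ _ (by omega)]

theorem pv_bis6 (x : Int) (h : 1048576 ≤ x) :
    pvBisectRight pvTHRESHOLDS x 0 pvTHRESHOLDS.length = 6 := by
  show pvBisectRight [1024, 4096, 16384, 65536, 262144, 1048576] x 0 6 = 6
  rw [pv_step _ _ _ _ (by omega)]; norm_num [List.getD]
  rw [if_neg (by omega : ¬ x < 65536)]
  rw [pv_step _ _ _ _ (by omega)]; norm_num [List.getD]
  rw [if_neg (by omega : ¬ x < 1048576)]
  rw [pv_base _ _ _ _ (by omega)]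

-- ===== VERDICT (by name: the statement is the Claim_ definition above) =====
theorem get_size_bucket_spec : Claim_equal_get_size_bucket := by
  intro x _
  unfold Spec_get_size_bucket get_size_bucket get_size_bucket_alt
  by_cases h1 : x < 1024
  · rw [pv_bis0 x h1]; simp [pvScanA, SIZE_BUCKET_THRESHOLDS, pvLABELS, h1]
  · by_cases h2 : x < 4096
    · rw [pv_bis1 x (by omega) h2]
      simp [pvScanA, SIZE_BUCKET_THRESHOLDS, pvLABELS, h1, h2]
    · by_cases h3 : x < 16384
      · rw [pv_bis2 x (by omega) h3]
        simp [pvScanA, SIZE_BUCKET_THRESHOLDS, pvLABELS, h1, h2, h3]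
      · by_cases h4 : x < 65536
        · rw [pv_bis3 x (by omega) h4]
          simp [pvScanA, SIZE_BUCKET_THRESHOLDS, pvLABELS, h1, h2, h3, h4]
        · by_cases h5 : x < 262144
          · rw [pv_bis4 x (by omega) h5]
            simp [pvScanA, SIZE_BUCKET_THRESHOLDS, pvLABELS, h1, h2, h3, h4, h5]
          · by_cases h6 : x < 1048576
            · rw [pv_bis5 x (by omega) h6]
              simp [pvScanA, SIZE_BUCKET_THRESHOLDS, pvLABELS, h1, h2, h3, h4, h5, h6]
            · rw [pv_bis6 x (by omega)]
              simp [pvScanA, SIZE_BUCKET_THRESHOLDS, pvLABELS, h1, h2, h3, h4, h5, h6]
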